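-- pv_equiv track=rewrite | github.com/aditisingh1053/Security_Games | new_start/plot_regret.py | make_slow_reveal
-- ===== SOURCE A (Python) =====
-- def make_slow_reveal(T, types):
--     k = len(types)
--     block = T // k
--     seq = []
--     for a in types:
--         seq.extend([a] * block)
--     while len(seq) < T:
--         seq.append(types[-1])
--     return seq[:T]
-- ===== SOURCE B (Python) =====
-- def make_slow_reveal(T, types):
--     k = len(types)
--     block = T // k
--     if T <= 0:
--         return []
--     if block == 0:
--         return [types[-1]] * T
--     return [types[min(i // block, k - 1)] for i in range(T)]
-- ===== Notes on version B (the rewrite author's own statement) =====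
-- stated objective: alternative
-- what changed: Replaces the per-type block-extension loop plus one-at-a-time padding while-loop with a single positional formula over range(T): element i is types[min(i//block, k-1)], with the block==0 and T<=0 cases handled in closed form.
import Mathlib
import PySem

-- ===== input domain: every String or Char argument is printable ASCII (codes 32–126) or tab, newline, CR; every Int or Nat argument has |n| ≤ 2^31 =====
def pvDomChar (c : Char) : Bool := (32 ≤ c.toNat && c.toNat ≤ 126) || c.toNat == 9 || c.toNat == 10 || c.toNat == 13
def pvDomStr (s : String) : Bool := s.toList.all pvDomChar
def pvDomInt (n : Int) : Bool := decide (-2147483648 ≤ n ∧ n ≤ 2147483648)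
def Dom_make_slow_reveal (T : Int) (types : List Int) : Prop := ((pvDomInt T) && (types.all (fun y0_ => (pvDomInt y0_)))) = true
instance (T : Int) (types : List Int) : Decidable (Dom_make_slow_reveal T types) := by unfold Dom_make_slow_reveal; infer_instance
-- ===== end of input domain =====

-- B replaces A's block-extension loop + one-at-a-time padding with a direct
-- positional formula types[min(i//block, k-1)] over range(T); same cost, alternative algorithm.

-- ===== PORT A =====
-- the 'while len(seq) < T: seq.append(types[-1])' loop; structural recursion on a fuel
-- that exactly covers the remaining iterations (the loop adds one element per step)
def pvPadGo (fuel : Nat) (t : Int) (last : Int) (seq : List Int) : List Int :=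
  match fuel with
  | 0 => seq
  | fuel + 1 => if (seq.length : Int) < t then pvPadGo fuel t last (seq ++ [last]) else seq

def pvPadA (t : Int) (last : Int) (seq : List Int) : List Int :=
  pvPadGo (t - seq.length).toNat t last seq

def make_slow_reveal (T : Int) (types : List Int) : List Int :=
  let k : Int := types.length
  let block : Int := PySem.Int.floordiv T k
  let seq : List Int := types.foldl (fun s a => s ++ List.replicate block.toNat a) []
  let seq2 : List Int := pvPadA T (PySem.List.pyGetD types (-1) 0) seq
  PySem.List.slice seq2 none (some T)

-- ===== PORT B =====
def make_slow_reveal_alt (T : Int) (types : List Int) : List Int :=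
  let k : Int := types.length
  let block : Int := PySem.Int.floordiv T k
  if T ≤ 0 then []
  else if block = 0 then List.replicate T.toNat (PySem.List.pyGetD types (-1) 0)
  else (PySem.List.pyRange 0 T 1).map (fun i =>
    PySem.List.pyGetD types (min (PySem.Int.floordiv i block) (k - 1)) 0)

-- ===== PRECONDITION & SPEC =====
-- Pre_ excludes exactly types = [], on which Python A raises ZeroDivisionError (T // 0).
def Pre_make_slow_reveal (T : Int) (types : List Int) : Prop := types ≠ []
instance (T : Int) (types : List Int) : Decidable (Pre_make_slow_reveal T types) := by unfold Pre_make_slow_reveal; infer_instance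
def pvWitness_make_slow_reveal : Int × List Int := (5, [1, 2])

def Spec_make_slow_reveal (T : Int) (types : List Int) (out : List Int) : Prop := out = make_slow_reveal_alt T types
instance (T : Int) (types : List Int) (out : List Int) : Decidable (Spec_make_slow_reveal T types out) := by unfold Spec_make_slow_reveal; infer_instance

-- ===== CLAIM (what is proved, stated in full; the proofs are below) =====
def Claim_equal_make_slow_reveal : Prop := ∀ (T : Int) (types : List Int), Dom_make_slow_reveal T types → Pre_make_slow_reveal T types → Spec_make_slow_reveal T types (make_slow_reveal T types)

-- ===== LEMMAS AND PROOFS =====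

-- the padding loop appends exactly (t - len).toNat copies of last
theorem pvPadGo_eq (t : Int) (last : Int) (fuel : Nat) :
    ∀ (seq : List Int), (t - seq.length).toNat ≤ fuel →
      pvPadGo fuel t last seq = seq ++ List.replicate (t - seq.length).toNat last := by
  induction fuel with
  | zero =>
      intro seq h
      have h0 : (t - (seq.length : Int)).toNat = 0 := by omega
      rw [pvPadGo, h0]
      simp
  | succ fuel ih =>
      intro seq h
      rw [pvPadGo]
      by_cases hlt : (seq.length : Int) < t
      · rw [if_pos hlt, ih (seq ++ [last]) (by simp; omega), List.append_assoc]
        congr 1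
        have h1 : (t - (seq.length : Int)).toNat
            = (t - ((seq ++ [last]).length : Int)).toNat + 1 := by simp; omega
        rw [h1, List.replicate_succ]
        simp
      · rw [if_neg hlt]
        have h0 : (t - (seq.length : Int)).toNat = 0 := by omega
        rw [h0]
        simp

theorem pvPadA_eq (t : Int) (last : Int) (seq : List Int) :
    pvPadA t last seq = seq ++ List.replicate (t - seq.length).toNat last := by
  exact pvPadGo_eq t last _ seq le_rfl

theorem pvFlat_len (b : Nat) (ts : List Int) :
    (ts.flatMap (fun a => List.replicate b a)).length = ts.length * b := by
  induction ts with
  | nil => simp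
  | cons a ts ih => simp [List.flatMap_cons, ih]; ring

theorem pvFlat_getD (b : Nat) (hb : 0 < b) (ts : List Int) (j : Nat)
    (hj : j < ts.length * b) :
    (ts.flatMap (fun a => List.replicate b a)).getD j 0 = ts.getD (j / b) 0 := by
  induction ts generalizing j with
  | nil => simp at hj
  | cons a ts ih =>
      rw [List.flatMap_cons]
      by_cases hjb : j < b
      · rw [List.getD_append _ _ _ _ (by simpa using hjb)]
        have : j / b = 0 := Nat.div_eq_of_lt hjb
        simp [this, List.getD, hjb]
      · push_neg at hjb
        rw [List.getD_append_right _ _ _ _ (by simpa using hjb)]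
        simp only [List.length_replicate]
        have hrec : j - b < ts.length * b := by
          have h2 : (ts.length + 1) * b = ts.length * b + b := by ring
          simp only [List.length_cons] at hj
          omega
        rw [ih _ hrec]
        have : j / b = (j - b) / b + 1 := by
          rw [Nat.div_eq_sub_div hb hjb]
        rw [this]
        simp [List.getD]

-- ===== VERDICT (by name: the statement is the Claim_ definition above) =====
theorem make_slow_reveal_spec : Claim_equal_make_slow_reveal := by
  intro T types _ hpre
  have kpos : 0 < types.length := List.length_pos_iff.mpr hpre
  unfold Spec_make_slow_reveal make_slow_reveal make_slow_reveal_alt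
  simp only [PySem.List.foldl_append_eq_flatMap, List.nil_append, pvPadA_eq]
  by_cases hT : T ≤ 0
  · -- T ≤ 0 : both sides are []
    have hb : PySem.Int.floordiv T types.length ≤ 0 := by
      rw [PySem.Int.floordiv_eq_ediv_of_pos (by exact_mod_cast kpos)]
      calc T / (types.length : Int) ≤ 0 / (types.length : Int) :=
            Int.ediv_le_ediv (by exact_mod_cast kpos) hT
        _ = 0 := by simp
    have hb0 : (PySem.Int.floordiv T types.length).toNat = 0 := by omega
    rw [hb0]
    have h1 : List.flatMap (List.replicate 0) types = ([] : List Int) := by simp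
    rw [h1]
    simp only [List.length_nil, Nat.cast_zero, List.nil_append, if_pos hT]
    have h2 : (T - 0).toNat = 0 := by omega
    rw [h2]
    simp [PySem.List.slice]
  · push_neg at hT
    obtain ⟨t, rfl⟩ : ∃ t : ℕ, T = (t : Int) := ⟨T.toNat, (Int.toNat_of_nonneg hT.le).symm⟩
    have ht : 0 < t := by exact_mod_cast hT
    rw [PySem.Int.floordiv_natCast]
    by_cases hb0 : t / types.length = 0
    · -- block == 0 : result is t copies of the last type
      rw [hb0]
      have h1 : List.flatMap (List.replicate ((0:ℕ):Int).toNat) types = ([] : List Int) := by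
        simp
      rw [h1]
      have hnle : ¬((t:Int) ≤ 0) := by omega
      simp only [List.length_nil, Nat.cast_zero, List.nil_append, if_neg hnle, Int.sub_zero,
        Int.toNat_natCast, if_pos rfl]
      rw [PySem.List.slice_to_natCast]
      simp [List.take_replicate]
    · -- block > 0 : compare element by element
      have bpos : 0 < t / types.length := Nat.pos_of_ne_zero hb0
      have hkb : types.length * (t / types.length) ≤ t := by
        calc types.length * (t / types.length)
            = t / types.length * types.length := Nat.mul_comm _ _
          _ ≤ t := Nat.div_mul_le_self t types.length
      have hlen : (List.flatMap (List.replicate ((↑(t / types.length) : Int)).toNat) types).length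
          = types.length * (t / types.length) := by
        rw [Int.toNat_natCast]
        exact pvFlat_len _ _
      have hnle : ¬((t:Int) ≤ 0) := by omega
      have hne0 : ¬((↑(t / types.length) : Int) = 0) := by exact_mod_cast hb0
      rw [hlen, if_neg hnle, if_neg hne0, PySem.List.pyRange_zero_natCast, List.map_map]
      have h2 : ((t:Int) - ↑(types.length * (t / types.length))).toNat
          = t - types.length * (t / types.length) := by omega
      rw [h2, PySem.List.slice_to_natCast]
      have hfull : (List.flatMap (List.replicate ((↑(t / types.length) : Int)).toNat) types ++
          List.replicate (t - types.length * (t / types.length))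
            (PySem.List.pyGetD types (-1) 0)).length = t := by
        rw [List.length_append, hlen, List.length_replicate]
        omega
      rw [List.take_of_length_le (le_of_eq hfull)]
      apply List.ext_getElem
      · rw [hfull, List.length_map, List.length_range]
      · intro j hj1 hj2
        have hjt : j < t := by rwa [hfull] at hj1
        -- right-hand side: the positional formula
        simp only [List.getElem_map, List.getElem_range, Function.comp_apply, PySem.Int.floordiv_natCast]
        have hc1 : ((types.length : Int) - 1) = ((types.length - 1 : ℕ) : Int) := by omega
        rw [hc1, ← Nat.cast_min, PySem.List.pyGetD_natCast]
        rw [← List.getD_eq_getElem _ 0 hj1]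
        by_cases hcase : j < types.length * (t / types.length)
        · rw [List.getD_append _ _ _ j (by rw [hlen]; exact hcase)]
          rw [Int.toNat_natCast]
          rw [pvFlat_getD _ bpos _ _ hcase]
          have hdlt : j / (t / types.length) < types.length :=
            (Nat.div_lt_iff_lt_mul bpos).mpr hcase
          rw [Nat.min_eq_left (by omega)]
        · push_neg at hcase
          rw [List.getD_append_right _ _ _ j (by rw [hlen]; exact hcase)]
          rw [hlen]
          have hrep : j - types.length * (t / types.length)
              < t - types.length * (t / types.length) := by omega
          rw [List.getD_eq_getElem _ 0 (by simpa using hrep), List.getElem_replicate]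
          have hge : types.length ≤ j / (t / types.length) :=
            (Nat.le_div_iff_mul_le bpos).mpr hcase
          rw [Nat.min_eq_right (by omega)]
          rw [PySem.List.pyGetD_neg_one _ _ hpre]
          rw [List.getLast_eq_getElem]
          rw [List.getD_eq_getElem _ 0 (by omega)]
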